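-- pv_equiv track=rewrite | github.com/Kishin98/Tabelle-Fisica-Tecnica | TablesData.py | getFluid
-- ===== SOURCE A (Python) =====
-- def getFluid(command):
--     start = 0
--     finish = 0
--     for i in range(0, len(command)):
--         if(command[i] == 'f'):
--             start = i + 2
--         if(command[i] == ' '):
--             finish = i
--             break
--     return command[start: finish]
-- ===== SOURCE B (Python) =====
-- def getFluid(command):
--     acc = []
--     skip = False
--     for c in command:
--         if c == ' ':
--             return ''.join(acc)
--         if c == 'f':
--             acc = []
--             skip = True
--         elif skip:
--             skip = False
--         else:
--             acc.append(c)
--     return ''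
-- ===== Notes on version B (the rewrite author's own statement) =====
-- stated objective: alternative
-- what changed: B never computes indices or slices: it builds the result characters directly in a single pass with an accumulator that resets on every 'f' (skipping the following character) and is returned at the first space, replacing A's start/finish index bookkeeping plus final slice.
import Mathlib
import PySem

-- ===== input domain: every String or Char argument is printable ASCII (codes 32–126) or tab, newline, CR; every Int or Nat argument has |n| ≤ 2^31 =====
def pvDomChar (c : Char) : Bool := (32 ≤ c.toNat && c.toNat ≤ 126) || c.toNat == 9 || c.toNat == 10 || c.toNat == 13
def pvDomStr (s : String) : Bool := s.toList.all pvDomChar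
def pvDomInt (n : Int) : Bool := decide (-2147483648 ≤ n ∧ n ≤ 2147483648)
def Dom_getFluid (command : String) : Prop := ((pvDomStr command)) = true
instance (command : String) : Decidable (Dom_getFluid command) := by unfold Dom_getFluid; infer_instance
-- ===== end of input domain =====

-- B builds the result characters directly in one pass (accumulator reset on 'f', skip flag for the
-- char after it, returned at the first space) instead of A's start/finish index bookkeeping + slice.

-- ===== PORT A =====
-- A's for-loop with break: state (start, finish), index i; 'f' sets start := i+2, ' ' breaks with finish := i.
def getFluidLoop : List Char → Int → Int → Int → Int × Int
  | [], _, start, finish => (start, finish)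
  | c :: rest, i, start, finish =>
    let start1 := if c = 'f' then i + 2 else start
    if c = ' ' then (start1, i)
    else getFluidLoop rest (i + 1) start1 finish

def getFluid (command : String) : String :=
  let r := getFluidLoop command.toList 0 0 0
  PySem.Str.slice command (some r.1) (some r.2)

-- ===== PORT B =====
-- Source B's loop: acc of output chars, skip flag; space returns acc, 'f' resets acc and sets skip,
-- skip drops one char, otherwise the char is appended; end of string returns ''.
def altGo : List Char → Bool → List Char → List Char
  | [], _, _ => []
  | c :: rest, skip, acc =>
    if c = ' ' then acc
    else if c = 'f' then altGo rest true []
    else if skip then altGo rest false acc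
    else altGo rest skip (acc ++ [c])

def getFluid_alt (command : String) : String :=
  String.ofList (altGo command.toList false [])

-- ===== PRECONDITION & SPEC =====
def Spec_getFluid (command : String) (out : String) : Prop := out = getFluid_alt command
instance (command : String) (out : String) : Decidable (Spec_getFluid command out) := by unfold Spec_getFluid; infer_instance

-- ===== CLAIM (what is proved, stated in full; the proofs are below) =====
def Claim_equal_getFluid : Prop := ∀ (command : String), Dom_getFluid command → Spec_getFluid command (getFluid command)

-- ===== LEMMAS AND PROOFS =====

-- index of the LAST 'f' in a list, counted from the front (proof-only helper)
def lastF : List Char → Option Nat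
  | [] => none
  | c :: r =>
    match lastF r with
    | some m => some (m + 1)
    | none => if c = 'f' then some 0 else none

theorem getFluidLoop_no_space (cs : List Char) (i st f : Int) (h : ' ' ∉ cs) :
    getFluidLoop cs i st f =
      ((match lastF cs with | some m => i + m + 2 | none => st), f) := by
  induction cs generalizing i st with
  | nil => simp [getFluidLoop, lastF]
  | cons c r ih =>
    simp only [List.mem_cons, not_or] at h
    have hc : ¬ c = ' ' := fun e => h.1 e.symm
    simp only [getFluidLoop, lastF, if_neg hc, ih _ _ h.2]
    by_cases hf : c = 'f' <;> cases hl : lastF r <;> simp [hf] <;> omega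

theorem getFluidLoop_space (u v : List Char) (i st f : Int) (h : ' ' ∉ u) :
    getFluidLoop (u ++ ' ' :: v) i st f =
      ((match lastF u with | some m => i + m + 2 | none => st), i + u.length) := by
  induction u generalizing i st with
  | nil => simp [getFluidLoop, lastF]
  | cons c r ih =>
    simp only [List.mem_cons, not_or] at h
    have hc : ¬ c = ' ' := fun e => h.1 e.symm
    simp only [List.cons_append, getFluidLoop, lastF, if_neg hc, ih _ _ h.2]
    by_cases hf : c = 'f' <;> cases hl : lastF r <;> simp [hf] <;> omega

theorem altGo_no_space (cs : List Char) (skip : Bool) (acc : List Char) (h : ' ' ∉ cs) :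
    altGo cs skip acc = [] := by
  induction cs generalizing skip acc with
  | nil => simp [altGo]
  | cons c r ih =>
    simp only [List.mem_cons, not_or] at h
    have hc : ¬ c = ' ' := fun e => h.1 e.symm
    by_cases hf : c = 'f'
    · simp [altGo, hf, ih _ _ h.2]
    · cases skip <;> simp [altGo, hc, hf, ih _ _ h.2]

theorem altGo_space (u v : List Char) (skip : Bool) (acc : List Char) (h : ' ' ∉ u) :
    altGo (u ++ ' ' :: v) skip acc =
      match lastF u with
      | some m => u.drop (m + 2)
      | none => if skip then acc ++ u.drop 1 else acc ++ u := by
  induction u generalizing skip acc with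
  | nil => cases skip <;> simp [altGo, lastF]
  | cons c r ih =>
    simp only [List.mem_cons, not_or] at h
    have hc : ¬ c = ' ' := fun e => h.1 e.symm
    by_cases hf : c = 'f'
    · simp only [List.cons_append, altGo, ih _ _ h.2, lastF, hf]
      cases hl : lastF r <;> simp
    · cases skip
      · simp only [List.cons_append, altGo, if_neg hc, Bool.false_eq_true, if_false,
          ih _ _ h.2, lastF, hf]
        cases hl : lastF r <;> simp
      · simp only [List.cons_append, altGo, if_neg hc,
          ih _ _ h.2, lastF, hf]
        cases hl : lastF r <;> simp

theorem getFluid_eq_alt (command : String) : getFluid command = getFluid_alt command := by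
  unfold getFluid getFluid_alt
  by_cases hmem : (' ' : Char) ∈ command.toList
  · -- there is a space: split the char list at the first space
    set cs := command.toList with hcs
    set u := cs.takeWhile (· ≠ ' ') with hu
    have hnot : ' ' ∉ u := by
      intro hx
      have := List.mem_takeWhile_imp hx
      simp at this
    have hdw : cs.dropWhile (· ≠ ' ') ≠ [] := by
      intro hnil
      have : ∀ x ∈ cs, x ≠ ' ' := by
        intro x hxcs
        have : x ∈ u ++ cs.dropWhile (· ≠ ' ') := by
          rw [hu, List.takeWhile_append_dropWhile]; exact hxcs
        rw [hnil, List.append_nil] at this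
        have := List.mem_takeWhile_imp this
        simpa using this
      exact this ' ' hmem rfl
    obtain ⟨c, v, hcv⟩ := List.exists_cons_of_ne_nil hdw
    have hc : c = ' ' := by
      have h1 : (cs.dropWhile (· ≠ ' ')).head? = some c := by rw [hcv]; rfl
      rw [List.head?_eq_some_head hdw] at h1
      have h2 := List.head_dropWhile_not (p := (· ≠ ' ')) (l := cs) hdw
      simp only [Option.some_inj] at h1
      rw [h1] at h2
      simpa using h2
    subst hc
    have hsplit : cs = u ++ ' ' :: v := by
      conv_lhs => rw [← List.takeWhile_append_dropWhile (p := (· ≠ ' ')) (l := cs)]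
      rw [hcv]
    have hloop : getFluidLoop cs 0 0 0 =
        ((match lastF u with | some m => (0 : Int) + m + 2 | none => 0), (0 : Int) + u.length) := by
      rw [hsplit]; exact getFluidLoop_space u v 0 0 0 hnot
    have halt : altGo cs false [] =
        (match lastF u with | some m => u.drop (m + 2) | none => u) := by
      rw [hsplit, altGo_space u v false [] hnot]
      cases lastF u <;> simp
    have hsplit' : command.toList = u ++ ' ' :: v := hsplit
    rw [hloop, halt]
    apply String.toList_inj.mp
    rw [PySem.Str.toList_slice]
    simp only [PySem.Chars.slice_eq_listSlice]
    cases hl : lastF u with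
    | none =>
      rw [PySem.List.slice_toNat _ (by norm_num) (by positivity)]
      have htn : ((0 : Int) + (u.length : Int)).toNat = u.length := by omega
      simp only [Int.toNat_zero, List.drop_zero, Nat.sub_zero, htn]
      rw [hsplit', List.take_left]
      simp
    | some m =>
      have h0 : (0 : Int) ≤ (0 : Int) + m + 2 := by omega
      rw [PySem.List.slice_toNat _ h0 (by positivity)]
      have ht : ((0 : Int) + m + 2).toNat = m + 2 := by omega
      have htn : ((0 : Int) + (u.length : Int)).toNat = u.length := by omega
      rw [ht, htn, hsplit']
      show _ = (String.ofList (u.drop (m + 2))).toList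
      rcases Nat.lt_or_ge u.length (m + 2) with hlt | hle
      · have hd : u.drop (m + 2) = [] := List.drop_eq_nil_of_le (by omega)
        have hz : u.length - (m + 2) = 0 := by omega
        simp [hd, hz]
      · rw [List.drop_append_of_le_length hle]
        have hlen : (u.drop (m + 2)).length = u.length - (m + 2) := by simp
        rw [List.take_append_of_le_length (by omega)]
        rw [List.take_of_length_le (by omega)]
        simp
  · -- no space: A slices to finish = 0, B returns ''
    have hloop := getFluidLoop_no_space command.toList 0 0 0 hmem
    have halt := altGo_no_space command.toList false [] hmem
    rw [hloop, halt]
    apply String.toList_inj.mp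
    rw [PySem.Str.toList_slice]
    simp only [PySem.Chars.slice_eq_listSlice]
    have h0 : (0 : Int) ≤ (match lastF command.toList with | some m => (0:Int) + m + 2 | none => 0) := by
      cases lastF command.toList with
      | none => norm_num
      | some m =>
        show (0:Int) ≤ 0 + (m:Int) + 2
        omega
    rw [PySem.List.slice_toNat _ h0 (by norm_num)]
    simp

-- ===== VERDICT (by name: the statement is the Claim_ definition above) =====
theorem getFluid_spec : Claim_equal_getFluid := by
  intro command _
  show getFluid command = getFluid_alt command
  exact getFluid_eq_alt command
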